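-- pv_equiv track=rewrite | github.com/KrashKart/python-problems | indiv_solutions/040-duplicate_digits_bonus.py | duplicate_digit_bonus
-- ===== SOURCE A (Python) =====
-- def duplicate_digit_bonus(n):
--     curr_digit, length, score = -1, 0, 0
--     multiplier = 2
--     while n > 0:
--         if curr_digit != -1 and curr_digit != n % 10:
--             score += 10 ** (length - 2) * multiplier if length > 1 else 0
--             length = 0
--             multiplier = max(multiplier - 1, 1)
--
--         curr_digit = n % 10
--         length += 1
--         n //= 10
--
--     score += 10 ** (length - 2) * multiplier if length > 1 else 0
--     return score
-- ===== SOURCE B (Python) =====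
-- def _bonus(L):
--     return 10 ** (L - 2) if L >= 2 else 0
--
--
-- def _strip(m, d):
--     # (length of the maximal low-end run of digit d in m, the rest of m)
--     if m > 0 and m % 10 == d:
--         L, rest = _strip(m // 10, d)
--         return L + 1, rest
--     return 0, m
--
--
-- def _total(m):
--     # sum of _bonus over all maximal digit runs of m
--     if m <= 0:
--         return 0
--     L, rest = _strip(m, m % 10)
--     return _bonus(L) + _total(rest)
--
--
-- def duplicate_digit_bonus(n):
--     if n <= 0:
--         return 0
--     L0, _ = _strip(n, n % 10)
--     return _bonus(L0) + _total(n)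
-- ===== Notes on version B (the rewrite author's own statement) =====
-- stated objective: alternative
-- what changed: A's single stateful digit loop carrying (current digit, run length, decaying multiplier) is replaced by a recursive run decomposition: sum a power-of-ten bonus over every maximal digit run and add the least-significant run's bonus once more.
import Mathlib
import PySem

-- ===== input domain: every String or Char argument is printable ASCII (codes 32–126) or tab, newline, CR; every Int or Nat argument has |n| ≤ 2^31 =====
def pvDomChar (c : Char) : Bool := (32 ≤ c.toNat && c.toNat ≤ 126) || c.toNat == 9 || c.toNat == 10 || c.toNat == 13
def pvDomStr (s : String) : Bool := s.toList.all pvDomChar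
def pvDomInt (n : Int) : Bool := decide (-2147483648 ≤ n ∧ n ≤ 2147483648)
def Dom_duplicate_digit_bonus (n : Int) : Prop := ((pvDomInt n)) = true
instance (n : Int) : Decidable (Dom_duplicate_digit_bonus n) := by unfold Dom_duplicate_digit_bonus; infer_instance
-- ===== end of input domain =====

-- B replaces A's single stateful loop (current digit, run length, decaying multiplier) by a
-- run decomposition: sum of 10^(L-2) over all digit runs plus one extra bonus for the
-- least-significant run; objective: alternative (same cost, different decomposition).


-- ===== PORT A =====
-- 'while n > 0' loop with state (curr_digit, length, score, multiplier); the fuel argument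
-- only makes the recursion structural (n loses a digit per step, so n.toNat + 1 never runs out)
def pvALoop : Nat → Int → Int → Int → Int → Int → Int
  | 0, _n, _curr, len, score, mult =>
      score + (if 1 < len then 10 ^ (len - 2).toNat * mult else 0)
  | fuel + 1, n, curr, len, score, mult =>
    if 0 < n then
      if curr ≠ -1 ∧ curr ≠ PySem.Int.mod n 10 then
        pvALoop fuel (PySem.Int.floordiv n 10) (PySem.Int.mod n 10) (0 + 1)
          (score + (if 1 < len then 10 ^ (len - 2).toNat * mult else 0)) (max (mult - 1) 1)
      else
        pvALoop fuel (PySem.Int.floordiv n 10) (PySem.Int.mod n 10) (len + 1) score mult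
    else
      score + (if 1 < len then 10 ^ (len - 2).toNat * mult else 0)

def duplicate_digit_bonus (n : Int) : Int := pvALoop (n.toNat + 1) n (-1) 0 0 2

-- ===== PORT B =====
def pvBonus (L : Int) : Int := if 2 ≤ L then 10 ^ (L - 2).toNat else 0

-- (length of the maximal low-end run of digit d in m, the rest of m); fuel as above
def pvStrip : Nat → Int → Int → Int × Int
  | 0, m, _d => (0, m)
  | fuel + 1, m, d =>
    if 0 < m ∧ PySem.Int.mod m 10 = d then
      ((pvStrip fuel (PySem.Int.floordiv m 10) d).1 + 1, (pvStrip fuel (PySem.Int.floordiv m 10) d).2)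
    else (0, m)

-- sum of pvBonus over all maximal digit runs of m; fuel as above
def pvTotal : Nat → Int → Int
  | 0, _m => 0
  | fuel + 1, m =>
    if m ≤ 0 then 0
    else
      pvBonus (pvStrip (fuel + 1) m (PySem.Int.mod m 10)).1
        + pvTotal fuel (pvStrip (fuel + 1) m (PySem.Int.mod m 10)).2

def duplicate_digit_bonus_alt (n : Int) : Int :=
  if n ≤ 0 then 0
  else pvBonus (pvStrip (n.toNat + 1) n (PySem.Int.mod n 10)).1 + pvTotal (n.toNat + 1) n

-- ===== PRECONDITION & SPEC =====
def Spec_duplicate_digit_bonus (n : Int) (out : Int) : Prop := out = duplicate_digit_bonus_alt n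
instance (n : Int) (out : Int) : Decidable (Spec_duplicate_digit_bonus n out) := by unfold Spec_duplicate_digit_bonus; infer_instance

-- ===== CLAIM (what is proved, stated in full; the proofs are below) =====
def Claim_equal_duplicate_digit_bonus : Prop := ∀ (n : Int), Dom_duplicate_digit_bonus n → Spec_duplicate_digit_bonus n (duplicate_digit_bonus n)

-- ===== LEMMAS AND PROOFS =====
lemma mod10_nonneg (m : Int) : 0 ≤ PySem.Int.mod m 10 := by
  simp only [PySem.Int.mod, Int.fmod_eq_emod]; omega

lemma fdiv10_nonneg (m : Int) (hm : 0 ≤ m) : 0 ≤ PySem.Int.floordiv m 10 := by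
  simp only [PySem.Int.floordiv, Int.fdiv_eq_ediv]; omega

lemma fdiv10_toNat_lt (m : Int) (hm : 0 < m) :
    (PySem.Int.floordiv m 10).toNat < m.toNat := by
  simp only [PySem.Int.floordiv, Int.fdiv_eq_ediv]; omega

lemma pvStrip_pos {f : Nat} {m d : Int} (h : 0 < m) (he : PySem.Int.mod m 10 = d) :
    pvStrip (f + 1) m d
      = ((pvStrip f (PySem.Int.floordiv m 10) d).1 + 1,
          (pvStrip f (PySem.Int.floordiv m 10) d).2) := by
  rw [pvStrip, if_pos ⟨h, he⟩]

lemma pvStrip_neg {f : Nat} {m d : Int} (h : ¬ (0 < m ∧ PySem.Int.mod m 10 = d)) :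
    pvStrip (f + 1) m d = (0, m) := by
  rw [pvStrip, if_neg h]

lemma pvTotal_pos {f : Nat} {m : Int} (h : 0 < m) :
    pvTotal (f + 1) m
      = pvBonus (pvStrip (f + 1) m (PySem.Int.mod m 10)).1
          + pvTotal f (pvStrip (f + 1) m (PySem.Int.mod m 10)).2 := by
  rw [pvTotal, if_neg (by omega)]

lemma pvTotal_nonpos {f : Nat} {m : Int} (h : m ≤ 0) : pvTotal (f + 1) m = 0 := by
  rw [pvTotal, if_pos h]

lemma flush_eq_bonus (L mult : Int) :
    (if 1 < L then 10 ^ (L - 2).toNat * mult else 0) = mult * pvBonus L := by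
  unfold pvBonus
  by_cases h2 : 2 ≤ L
  · rw [if_pos (by omega : 1 < L), if_pos h2]; ring
  · rw [if_neg (by omega : ¬ 1 < L), if_neg h2]; ring

lemma pvStrip_snd_bounds (f : Nat) :
    ∀ (m d : Int), 0 ≤ m → 0 ≤ (pvStrip f m d).2 ∧ (pvStrip f m d).2 ≤ m := by
  induction f with
  | zero => intro m d hm; exact ⟨hm, le_refl m⟩
  | succ k ih =>
    intro m d hm
    by_cases h : 0 < m ∧ PySem.Int.mod m 10 = d
    · rw [pvStrip_pos h.1 h.2]
      have := ih (PySem.Int.floordiv m 10) d (fdiv10_nonneg m hm)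
      have hle : PySem.Int.floordiv m 10 ≤ m := by
        simp only [PySem.Int.floordiv, Int.fdiv_eq_ediv]; omega
      exact ⟨this.1, le_trans this.2 hle⟩
    · rw [pvStrip_neg h]; exact ⟨hm, le_refl m⟩

lemma pvStrip_fuel (f1 : Nat) :
    ∀ (f2 : Nat) (m d : Int), m.toNat < f1 → m.toNat < f2 → pvStrip f1 m d = pvStrip f2 m d := by
  induction f1 with
  | zero => intro f2 m d h1 _; omega
  | succ k1 ih =>
    intro f2 m d h1 h2
    cases f2 with
    | zero => omega
    | succ k2 =>
      by_cases h : 0 < m ∧ PySem.Int.mod m 10 = d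
      · rw [pvStrip_pos h.1 h.2, pvStrip_pos h.1 h.2]
        have hlt := fdiv10_toNat_lt m h.1
        rw [ih k2 (PySem.Int.floordiv m 10) d (by omega) (by omega)]
      · rw [pvStrip_neg h, pvStrip_neg h]

lemma pvTotal_fuel (f1 : Nat) :
    ∀ (f2 : Nat) (m : Int), m.toNat < f1 → m.toNat < f2 → pvTotal f1 m = pvTotal f2 m := by
  induction f1 with
  | zero => intro f2 m h1 _; omega
  | succ k1 ih =>
    intro f2 m h1 h2
    cases f2 with
    | zero => omega
    | succ k2 =>
      by_cases hpos : 0 < m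
      · rw [pvTotal_pos hpos, pvTotal_pos hpos]
        rw [pvStrip_fuel (k2 + 1) (k1 + 1) m (PySem.Int.mod m 10) (by omega) (by omega)]
        have hb := pvStrip_snd_bounds (k1 + 1) m (PySem.Int.mod m 10) (by omega)
        rw [pvStrip_pos hpos rfl] at hb ⊢
        simp only [] at hb ⊢
        have hb2 := pvStrip_snd_bounds k1 (PySem.Int.floordiv m 10) (PySem.Int.mod m 10)
          (fdiv10_nonneg m (by omega))
        have hlt := fdiv10_toNat_lt m hpos
        rw [ih k2 (pvStrip k1 (PySem.Int.floordiv m 10) (PySem.Int.mod m 10)).2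
              (by omega) (by omega)]
      · rw [pvTotal_nonpos (by omega), pvTotal_nonpos (by omega)]

-- A's loop, started inside a run of digit d of current length L, yields: score, plus mult
-- times the bonus of the completed current run, plus the plain bonus of every later run.
lemma pvALoop_char (f : Nat) :
    ∀ (m d L s mult : Int), m.toNat < f → 0 ≤ m → 0 ≤ d → 1 ≤ L → (mult = 1 ∨ mult = 2) →
    pvALoop f m d L s mult
      = s + mult * pvBonus (L + (pvStrip f m d).1) + pvTotal f ((pvStrip f m d).2) := by
  induction f with
  | zero => intro m d L s mult hf _ _ _ _; omega
  | succ k ih =>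
    intro m d L s mult hf hm hd hL hmult
    by_cases hpos : 0 < m
    · have hd' := mod10_nonneg m
      have hdiv : (PySem.Int.floordiv m 10).toNat < k := by
        have := fdiv10_toNat_lt m hpos; omega
      have hdivnn := fdiv10_nonneg m hm
      rw [pvALoop, if_pos hpos]
      by_cases heq : PySem.Int.mod m 10 = d
      · -- same digit: extend the run
        rw [if_neg (by rw [heq]; omega : ¬ (d ≠ -1 ∧ d ≠ PySem.Int.mod m 10)), heq]
        rw [ih (PySem.Int.floordiv m 10) d (L + 1) s mult hdiv hdivnn hd (by omega) hmult]
        rw [pvStrip_pos hpos heq]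
        simp only []
        have harith : L + 1 + (pvStrip k (PySem.Int.floordiv m 10) d).1
            = L + ((pvStrip k (PySem.Int.floordiv m 10) d).1 + 1) := by ring
        rw [harith]
        have hb := pvStrip_snd_bounds k (PySem.Int.floordiv m 10) d hdivnn
        rw [pvTotal_fuel k (k + 1) (pvStrip k (PySem.Int.floordiv m 10) d).2
              (by omega) (by omega)]
      · -- run boundary: flush, continue with multiplier 1
        rw [if_pos ⟨by omega, fun h => heq h.symm⟩]
        rw [ih (PySem.Int.floordiv m 10) (PySem.Int.mod m 10) (0 + 1)
              (s + (if 1 < L then 10 ^ (L - 2).toNat * mult else 0)) (max (mult - 1) 1)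
              hdiv hdivnn hd' (by omega) (by omega)]
        rw [(by omega : max (mult - 1) 1 = (1:Int))]
        rw [pvStrip_neg (by tauto : ¬ (0 < m ∧ PySem.Int.mod m 10 = d))]
        simp only []
        rw [pvTotal_pos hpos, pvStrip_pos hpos rfl]
        simp only []
        rw [flush_eq_bonus]
        have harith : (0:Int) + 1 + (pvStrip k (PySem.Int.floordiv m 10) (PySem.Int.mod m 10)).1
            = (pvStrip k (PySem.Int.floordiv m 10) (PySem.Int.mod m 10)).1 + 1 := by ring
        rw [harith]
        ring
    · have hm0 : m = 0 := by omega
      subst hm0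
      rw [pvALoop, if_neg (by omega : ¬ (0:Int) < 0),
          pvStrip_neg (by omega), pvTotal_nonpos (le_refl 0), flush_eq_bonus]
      simp only [add_zero]

-- ===== VERDICT (by name: the statement is the Claim_ definition above) =====
theorem duplicate_digit_bonus_spec : Claim_equal_duplicate_digit_bonus := by
  intro n _
  unfold Spec_duplicate_digit_bonus duplicate_digit_bonus duplicate_digit_bonus_alt
  by_cases hpos : 0 < n
  · rw [if_neg (by omega : ¬ n ≤ 0)]
    rw [pvALoop, if_pos hpos, if_neg (by simp : ¬ ((-1:Int) ≠ -1 ∧ (-1:Int) ≠ PySem.Int.mod n 10))]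
    rw [pvALoop_char n.toNat (PySem.Int.floordiv n 10) (PySem.Int.mod n 10) (0 + 1) 0 2
          (fdiv10_toNat_lt n hpos) (fdiv10_nonneg n (by omega)) (mod10_nonneg n)
          (by omega) (Or.inr rfl)]
    rw [pvTotal_pos hpos, pvStrip_pos hpos rfl]
    simp only []
    have harith : (0:Int) + 1 + (pvStrip n.toNat (PySem.Int.floordiv n 10) (PySem.Int.mod n 10)).1
        = (pvStrip n.toNat (PySem.Int.floordiv n 10) (PySem.Int.mod n 10)).1 + 1 := by ring
    rw [harith]
    ring
  · rw [if_pos (by omega : n ≤ 0), pvALoop, if_neg hpos]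
    simp
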